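-- pv_equiv track=rewrite | github.com/thelight0804/Algorithm-study | Python/Programmers/Num42840.py | solution
-- ===== SOURCE A (Python) =====
-- def solution(answers):
--   answer = []
--
--   # 찍는 방식
--   per1 = [1, 2, 3, 4, 5]
--   per2 = [2, 1, 2, 3, 2, 4, 2, 5]
--   per3 = [3, 3, 1, 1, 2, 2, 4, 4, 5, 5]
--
--   # 정답 개수
--   score = [0] * 3
--
--   # Brute force
--   for i in range(len(answers)):
--       if per1[i % len(per1)] == answers[i]:
--           score[0] += 1
--       if per2[i % len(per2)] == answers[i]:
--           score[1] += 1
--       if per3[i % len(per3)] == answers[i]: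
--           score[2] += 1
--
--   # 가장 많은 문제를 맞춘 사람
--   for i, value in enumerate(score):
--       if value == max(score):
--           answer.append(i+1)
--
--   return answer
-- ===== SOURCE B (Python) =====
-- def solution(answers):
--     pats = [[1, 2, 3, 4, 5],
--             [2, 1, 2, 3, 2, 4, 2, 5],
--             [3, 3, 1, 1, 2, 2, 4, 4, 5, 5]]
--     # 40 = lcm(5, 8, 10): every pattern's guess at index i depends only on i % 40.
--     # Bucket-count the answers once by (position mod 40, value), then score each
--     # person by 40 table lookups instead of testing patterns at every index.
--     counts = {}
--     for i, a in enumerate(answers):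
--         key = (i % 40, a)
--         counts[key] = counts.get(key, 0) + 1
--     score = [sum(counts.get((j, p[j % len(p)]), 0) for j in range(40)) for p in pats]
--     best = max(score)
--     return [i + 1 for i, s in enumerate(score) if s == best]
-- ===== Notes on version B (the rewrite author's own statement) =====
-- stated objective: alternative
-- what changed: Instead of testing all three patterns at every answer index, B bucket-counts the answers once into a dictionary keyed by (index mod 40, value) (40 = lcm of the pattern lengths) and scores each person by summing 40 dictionary lookups, one per cycle position.
import Mathlib
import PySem

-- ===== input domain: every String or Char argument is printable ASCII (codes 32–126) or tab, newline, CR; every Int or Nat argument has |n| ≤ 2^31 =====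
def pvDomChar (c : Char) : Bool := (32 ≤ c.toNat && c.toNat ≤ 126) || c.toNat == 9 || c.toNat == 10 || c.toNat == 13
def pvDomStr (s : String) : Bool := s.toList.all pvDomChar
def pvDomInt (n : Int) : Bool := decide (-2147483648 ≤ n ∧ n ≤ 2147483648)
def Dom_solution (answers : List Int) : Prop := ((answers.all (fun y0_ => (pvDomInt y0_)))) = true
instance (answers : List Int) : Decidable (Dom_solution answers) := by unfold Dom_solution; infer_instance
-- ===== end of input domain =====

-- B replaces A's per-index test of all three patterns by one bucket-count of answers keyed by
-- (index mod 40, value) (40 = lcm of the pattern lengths) and 40 table lookups per person (objective: alternative).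


-- ===== PORT A =====
def solution (answers : List Int) : List Int :=
  let per1 : List Int := [1, 2, 3, 4, 5]
  let per2 : List Int := [2, 1, 2, 3, 2, 4, 2, 5]
  let per3 : List Int := [3, 3, 1, 1, 2, 2, 4, 4, 5, 5]
  -- the three cells of Python's score list, mutated through the single loop
  let score : Int × Int × Int :=
    (PySem.List.pyRange 0 (PySem.List.len answers) 1).foldl
      (fun s i =>
        let s0 := if PySem.List.pyGetD per1 (PySem.Int.mod i (PySem.List.len per1)) 0
                     = PySem.List.pyGetD answers i 0 then s.1 + 1 else s.1
        let s1 := if PySem.List.pyGetD per2 (PySem.Int.mod i (PySem.List.len per2)) 0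
                     = PySem.List.pyGetD answers i 0 then s.2.1 + 1 else s.2.1
        let s2 := if PySem.List.pyGetD per3 (PySem.Int.mod i (PySem.List.len per3)) 0
                     = PySem.List.pyGetD answers i 0 then s.2.2 + 1 else s.2.2
        (s0, s1, s2)) (0, 0, 0)
  let scoreL : List Int := [score.1, score.2.1, score.2.2]
  -- max(score) is recomputed in the loop condition, as in A; scoreL is never empty so getD's default is unreachable
  (PySem.List.enumerate scoreL 0).foldl
    (fun answer iv =>
      if iv.2 = (PySem.List.max? scoreL (fun y => y)).getD 0 then answer ++ [iv.1 + 1] else answer) []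

-- ===== PORT B =====
def solution_alt (answers : List Int) : List Int :=
  let pats : List (List Int) := [[1, 2, 3, 4, 5], [2, 1, 2, 3, 2, 4, 2, 5], [3, 3, 1, 1, 2, 2, 4, 4, 5, 5]]
  -- the dict 'counts', built by the first loop: counts[(i % 40, a)] += 1
  let counts : PySem.Dict (Int × Int) Int :=
    (PySem.List.enumerate answers 0).foldl
      (fun d ia => d.insert (PySem.Int.mod ia.1 40, ia.2) (d.getD (PySem.Int.mod ia.1 40, ia.2) 0 + 1))
      PySem.Dict.empty
  let score : List Int := pats.map (fun p =>
    ((PySem.List.pyRange 0 40 1).map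
      (fun j => counts.getD (j, PySem.List.pyGetD p (PySem.Int.mod j (PySem.List.len p)) 0) 0)).sum)
  let best : Int := (PySem.List.max? score (fun y => y)).getD 0
  (PySem.List.enumerate score 0).filterMap
    (fun sv => if sv.2 = best then some (sv.1 + 1) else none)

-- ===== PRECONDITION & SPEC =====
def Spec_solution (answers : List Int) (out : List Int) : Prop := out = solution_alt answers
instance (answers : List Int) (out : List Int) : Decidable (Spec_solution answers out) := by unfold Spec_solution; infer_instance

-- ===== CLAIM (what is proved, stated in full; the proofs are below) =====
def Claim_equal_solution : Prop := ∀ (answers : List Int), Dom_solution answers → Spec_solution answers (solution answers)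

-- ===== LEMMAS AND PROOFS =====

-- the number of indices i with answers[i] = p[i % len p] (the common value of both score computations)
def cntP (p : List Int) (answers : List Int) : Int :=
  ((PySem.List.enumerate answers 0).map
    (fun ia => if ia.2 = PySem.List.pyGetD p (PySem.Int.mod ia.1 (PySem.List.len p)) 0 then (1 : Int) else 0)).sum

-- A's loop body
def stepA (answers : List Int) (s : Int × Int × Int) (i : Int) : Int × Int × Int :=
  let s0 := if PySem.List.pyGetD [1, 2, 3, 4, 5] (PySem.Int.mod i (PySem.List.len ([1, 2, 3, 4, 5] : List Int))) 0
               = PySem.List.pyGetD answers i 0 then s.1 + 1 else s.1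
  let s1 := if PySem.List.pyGetD [2, 1, 2, 3, 2, 4, 2, 5] (PySem.Int.mod i (PySem.List.len ([2, 1, 2, 3, 2, 4, 2, 5] : List Int))) 0
               = PySem.List.pyGetD answers i 0 then s.2.1 + 1 else s.2.1
  let s2 := if PySem.List.pyGetD [3, 3, 1, 1, 2, 2, 4, 4, 5, 5] (PySem.Int.mod i (PySem.List.len ([3, 3, 1, 1, 2, 2, 4, 4, 5, 5] : List Int))) 0
               = PySem.List.pyGetD answers i 0 then s.2.2 + 1 else s.2.2
  (s0, s1, s2)

lemma cnt_append (p : List Int) (xs : List Int) (x : Int) :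
    cntP p (xs ++ [x]) = cntP p xs +
      (if x = PySem.List.pyGetD p (PySem.Int.mod (xs.length : Int) (PySem.List.len p)) 0 then 1 else 0) := by
  simp [cntP, PySem.List.enumerate_append, PySem.List.enumerate_cons]

lemma pyGetD_append_left (xs : List Int) (x : Int) (i : Int) (h0 : 0 ≤ i) (h : i < (xs.length : Int)) :
    PySem.List.pyGetD (xs ++ [x]) i 0 = PySem.List.pyGetD xs i 0 := by
  rw [PySem.List.pyGetD_of_nonneg _ _ h0, PySem.List.pyGetD_of_nonneg _ _ h0]
  have hlt : i.toNat < xs.length := by omega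
  simp [List.getD, List.getElem?_append_left hlt]

lemma loopA_eq (answers : List Int) :
    (PySem.List.pyRange 0 (PySem.List.len answers) 1).foldl (stepA answers) (0, 0, 0) =
      (cntP [1, 2, 3, 4, 5] answers, cntP [2, 1, 2, 3, 2, 4, 2, 5] answers,
       cntP [3, 3, 1, 1, 2, 2, 4, 4, 5, 5] answers) := by
  induction answers using List.reverseRecOn with
  | nil => simp [cntP, PySem.List.pyRange, PySem.List.enumerate]
  | append_singleton xs x ih =>
    have hlen : PySem.List.len (xs ++ [x]) = (xs.length : Int) + 1 := by
      simp [PySem.List.len_eq]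
    rw [hlen, PySem.List.pyRange_one_succ_right (by positivity), List.foldl_append]
    have hcong : (PySem.List.pyRange 0 (xs.length : Int) 1).foldl (stepA (xs ++ [x])) (0, 0, 0)
        = (PySem.List.pyRange 0 (xs.length : Int) 1).foldl (stepA xs) (0, 0, 0) := by
      apply PySem.List.foldl_congr_mem
      intro acc i hi
      have := (PySem.List.mem_pyRange_one (a := 0) (b := (xs.length : Int)) (x := i)).1 hi
      simp [stepA, pyGetD_append_left xs x i this.1 this.2]
    rw [hcong]
    simp only [PySem.List.len_eq] at ih
    rw [ih]
    have hx : PySem.List.pyGetD (xs ++ [x]) (xs.length : Int) 0 = x := by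
      rw [PySem.List.pyGetD_of_nonneg _ _ (by positivity)]
      simp [List.getD]
    simp only [List.foldl]
    simp only [stepA, hx, PySem.List.len_eq, cnt_append]
    simp only [Prod.mk.injEq]
    refine ⟨?_, ?_, ?_⟩ <;> split_ifs with h h' <;> omega

-- B's key list: one (i % 40, a) per answer
def keyList (answers : List Int) : List (Int × Int) :=
  (PySem.List.enumerate answers 0).map (fun ia => (PySem.Int.mod ia.1 40, ia.2))

lemma keyList_append (xs : List Int) (x : Int) :
    keyList (xs ++ [x]) = keyList xs ++ [(PySem.Int.mod (xs.length : Int) 40, x)] := by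
  simp [keyList, PySem.List.enumerate_append, PySem.List.enumerate_cons]

-- the dict B builds is the counter of keyList
lemma counts_eq (answers : List Int) :
    (PySem.List.enumerate answers 0).foldl
      (fun d ia => d.insert (PySem.Int.mod ia.1 40, ia.2) (d.getD (PySem.Int.mod ia.1 40, ia.2) 0 + 1))
      PySem.Dict.empty = PySem.Dict.counter (keyList answers) := by
  rw [keyList, ← PySem.Dict.foldl_insert_getD_add_one_eq_counter, List.foldl_map]

-- a 0-elsewhere sum over a Nodup list collapses to its single nonzero term
lemma sum_map_ite_single (l : List Int) (hl : l.Nodup) (m : Int) (hm : m ∈ l) (g : Int → Int) :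
    (l.map (fun j => if j = m then g j else 0)).sum = g m := by
  induction l with
  | nil => cases hm
  | cons a t ih =>
    rcases List.mem_cons.1 hm with rfl | hmt
    · have hz : (t.map (fun j => if j = m then g j else 0)).sum = 0 := by
        apply List.sum_eq_zero
        intro y hy
        rcases List.mem_map.1 hy with ⟨j, hj, rfl⟩
        have : j ≠ m := fun h => (List.nodup_cons.1 hl).1 (h ▸ hj)
        simp [this]
      simp [hz]
    · have ham : a ≠ m := fun h => (List.nodup_cons.1 hl).1 (h ▸ hmt)
      simp [ham, ih (List.nodup_cons.1 hl).2 hmt]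

-- summing the counts of one appended key over the 40 cycle positions adds exactly its match bit
lemma sum_count_singleton (m x : Int) (pj : Int → Int) (hm0 : 0 ≤ m) (hm40 : m < 40) :
    ((PySem.List.pyRange 0 40 1).map
      (fun j => ((List.count (j, pj j) [((m, x) : Int × Int)] : Nat) : Int))).sum
      = if x = pj m then 1 else 0 := by
  have hstep : ∀ j : Int,
      ((List.count (j, pj j) [((m, x) : Int × Int)] : Nat) : Int)
        = (fun j => if j = m then (if x = pj j then (1 : Int) else 0) else 0) j := by
    intro j
    rw [List.count_singleton]
    by_cases hj : j = m
    · subst hj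
      by_cases hx : x = pj j <;> simp [hx]
    · have : ¬ (((m, x) : Int × Int) == (j, pj j)) = true := by
        simp [Prod.ext_iff]
        intro h; exact absurd h.symm hj
      simp [this, hj]
  rw [List.map_congr_left (fun j _ => hstep j)]
  exact sum_map_ite_single _ (PySem.List.nodup_pyRange_one 0 40) m
    ((PySem.List.mem_pyRange_one).2 ⟨hm0, hm40⟩) _

-- B's per-pattern sum of table lookups equals the match count, for any pattern whose length divides 40
lemma sumB_eq (p : List Int) (hlen : 0 < p.length) (hdvd : ((p.length : Int)) ∣ 40)
    (answers : List Int) :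
    ((PySem.List.pyRange 0 40 1).map
      (fun j => (PySem.Dict.counter (keyList answers)).getD
        (j, PySem.List.pyGetD p (PySem.Int.mod j (PySem.List.len p)) 0) 0)).sum
      = cntP p answers := by
  induction answers using List.reverseRecOn with
  | nil =>
    simp [PySem.Dict.getD_counter, keyList, PySem.List.enumerate, cntP]
  | append_singleton xs x ih =>
    have hmod : ∀ a : Int, PySem.Int.mod (PySem.Int.mod a 40) (PySem.List.len p)
        = PySem.Int.mod a (PySem.List.len p) := by
      intro a
      have h40 : (0 : Int) < 40 := by norm_num
      have hL : (0 : Int) < (p.length : Int) := by exact_mod_cast hlen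
      rw [PySem.List.len_eq, PySem.Int.mod_eq_emod_of_pos h40,
        PySem.Int.mod_eq_emod_of_pos hL, PySem.Int.mod_eq_emod_of_pos hL,
        Int.emod_emod_of_dvd a hdvd]
    set m : Int := PySem.Int.mod (xs.length : Int) 40 with hm
    have hm0 : 0 ≤ m := PySem.Int.mod_nonneg _ (by norm_num)
    have hm40 : m < 40 := PySem.Int.mod_lt _ (by norm_num)
    have hsplit : ((PySem.List.pyRange 0 40 1).map
        (fun j => (PySem.Dict.counter (keyList (xs ++ [x]))).getD
          (j, PySem.List.pyGetD p (PySem.Int.mod j (PySem.List.len p)) 0) 0)).sum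
        = ((PySem.List.pyRange 0 40 1).map
            (fun j => (PySem.Dict.counter (keyList xs)).getD
              (j, PySem.List.pyGetD p (PySem.Int.mod j (PySem.List.len p)) 0) 0)).sum
          + ((PySem.List.pyRange 0 40 1).map
              (fun j => ((List.count (j, PySem.List.pyGetD p (PySem.Int.mod j (PySem.List.len p)) 0)
                [((m, x) : Int × Int)] : Nat) : Int))).sum := by
      rw [← List.sum_map_add]
      refine congrArg List.sum (List.map_congr_left ?_)
      intro j _
      rw [PySem.Dict.getD_counter, PySem.Dict.getD_counter, keyList_append, List.count_append]
      push_cast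
      ring
    rw [hsplit, ih, cnt_append,
      sum_count_singleton m x (fun j => PySem.List.pyGetD p (PySem.Int.mod j (PySem.List.len p)) 0) hm0 hm40]
    simp only [hm, hmod]

lemma select_eq (s1 s2 s3 : Int) :
    (PySem.List.enumerate [s1, s2, s3] 0).foldl
      (fun answer iv =>
        if iv.2 = (PySem.List.max? [s1, s2, s3] (fun y => y)).getD 0 then answer ++ [iv.1 + 1] else answer) [] =
    (PySem.List.enumerate [s1, s2, s3] 0).filterMap
      (fun sv => if sv.2 = (PySem.List.max? [s1, s2, s3] (fun y => y)).getD 0 then some (sv.1 + 1) else none) := by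
  simp only [PySem.List.enumerate_cons, PySem.List.enumerate_nil]
  simp only [List.foldl, List.filterMap]
  split_ifs <;> simp

-- ===== VERDICT (by name: the statement is the Claim_ definition above) =====
theorem solution_spec : Claim_equal_solution := by
  intro answers _
  show solution answers = solution_alt answers
  unfold solution solution_alt
  simp only []
  have hA := loopA_eq answers
  unfold stepA at hA
  rw [show ((PySem.List.pyRange 0 (PySem.List.len answers) 1).foldl _ ((0:Int), (0:Int), (0:Int)))
      = (cntP [1, 2, 3, 4, 5] answers, cntP [2, 1, 2, 3, 2, 4, 2, 5] answers,
         cntP [3, 3, 1, 1, 2, 2, 4, 4, 5, 5] answers) from hA]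
  rw [counts_eq answers]
  simp only [List.map]
  simp only [sumB_eq [1, 2, 3, 4, 5] (by norm_num) (by norm_num) answers,
    sumB_eq [2, 1, 2, 3, 2, 4, 2, 5] (by norm_num) (by norm_num) answers,
    sumB_eq [3, 3, 1, 1, 2, 2, 4, 4, 5, 5] (by norm_num) (by norm_num) answers]
  exact select_eq _ _ _
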